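-- pv_equiv track=rewrite | github.com/EricBintner/Halbert | cerebric_core/cerebric_core/discovery/scanners/service.py | get_installation_source
-- ===== SOURCE A (Python) =====
-- from typing import List, Optional
--
-- SYSTEM_INSTALLED = {
--     'systemd', 'dbus', 'rsyslog', 'syslog', 'journald', 'logind',
--     'udev', 'acpid', 'cron', 'anacron', 'atd', 'polkit',
--     'NetworkManager', 'systemd-networkd', 'wpa_supplicant',
--     'gdm', 'sddm', 'lightdm', 'xdm',
--     'alsa', 'pulseaudio', 'pipewire',
--     'cups', 'bluetooth', 'avahi',
--     'udisks', 'upower', 'colord', 'geoclue',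
--     'snapd', 'packagekit', 'fwupd',
-- }
--
-- def get_installation_source(name: str, unit_file: Optional[str] = None) -> str:
--     """Determine if a service was installed by the system or user."""
--     name_lower = name.lower()
--
--     # Check against known system services
--     for sys_svc in SYSTEM_INSTALLED:
--         if sys_svc.lower() in name_lower:
--             return 'system'
--
--     # Check unit file path if available
--     if unit_file:
--         if '/usr/lib/' in unit_file or '/lib/systemd/' in unit_file:
--             return 'system'
--         elif '/etc/systemd/user/' in unit_file or '/.local/' in unit_file:
--             return 'user'
--
--     return 'unknown'
-- ===== SOURCE B (Python) =====
-- from typing import Optional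
--
-- # Known system-service names, lowercased once at module load (A's set, lowered).
-- _PATTERNS = {
--     'systemd', 'dbus', 'rsyslog', 'syslog', 'journald', 'logind',
--     'udev', 'acpid', 'cron', 'anacron', 'atd', 'polkit',
--     'networkmanager', 'systemd-networkd', 'wpa_supplicant',
--     'gdm', 'sddm', 'lightdm', 'xdm',
--     'alsa', 'pulseaudio', 'pipewire',
--     'cups', 'bluetooth', 'avahi',
--     'udisks', 'upower', 'colord', 'geoclue',
--     'snapd', 'packagekit', 'fwupd',
-- }
-- # The distinct pattern lengths (sorted), so a sliding window of each length
-- # can be looked up directly in the pattern set.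
-- _LENGTHS = sorted({len(p) for p in _PATTERNS})
-- # Path-substring rules, first match wins.
-- _PATH_RULES = [
--     ('/usr/lib/', 'system'),
--     ('/lib/systemd/', 'system'),
--     ('/etc/systemd/user/', 'user'),
--     ('/.local/', 'user'),
-- ]
--
-- def get_installation_source(name: str, unit_file: Optional[str] = None) -> str:
--     """Determine if a service was installed by the system or user."""
--     s = name.lower()
--     n = len(s)
--     # Sliding-window set lookup: for every start position, look the window of
--     # each possible pattern length up in the pattern set.
--     for i in range(n):
--         for L in _LENGTHS:
--             if i + L <= n and s[i:i + L] in _PATTERNS: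
--                 return 'system'
--     if unit_file:
--         for sub, src in _PATH_RULES:
--             if sub in unit_file:
--                 return src
--     return 'unknown'
-- ===== Notes on version B (the rewrite author's own statement) =====
-- stated objective: alternative
-- what changed: A loops over the pattern set and does a full substring search of the name per pattern, then an if/elif chain over path substrings; B slides a window over the lowercased name, looking each window of every possible pattern length up in a set, and resolves the unit-file path with a data-driven first-match rule table.
import Mathlib
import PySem

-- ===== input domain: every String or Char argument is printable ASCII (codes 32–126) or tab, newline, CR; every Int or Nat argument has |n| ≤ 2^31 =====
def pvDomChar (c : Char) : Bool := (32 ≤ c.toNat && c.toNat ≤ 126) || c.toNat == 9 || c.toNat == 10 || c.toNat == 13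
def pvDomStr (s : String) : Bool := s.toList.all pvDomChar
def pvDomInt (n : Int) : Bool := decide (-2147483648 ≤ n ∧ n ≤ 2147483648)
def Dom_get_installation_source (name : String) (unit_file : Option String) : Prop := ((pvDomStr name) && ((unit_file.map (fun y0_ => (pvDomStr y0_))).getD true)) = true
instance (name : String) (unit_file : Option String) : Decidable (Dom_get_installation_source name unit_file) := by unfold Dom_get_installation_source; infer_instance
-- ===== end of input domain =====

-- B replaces A's per-pattern substring scans by a sliding-window set lookup over the
-- lowercased name and a data-driven rule table for the path checks; alternative structure, same cost.


-- ===== PORT A =====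
-- SYSTEM_INSTALLED (a Python set literal; iteration order is irrelevant: every hit returns 'system')
def pvSys : List String :=
  ["systemd", "dbus", "rsyslog", "syslog", "journald", "logind",
   "udev", "acpid", "cron", "anacron", "atd", "polkit",
   "NetworkManager", "systemd-networkd", "wpa_supplicant",
   "gdm", "sddm", "lightdm", "xdm",
   "alsa", "pulseaudio", "pipewire",
   "cups", "bluetooth", "avahi",
   "udisks", "upower", "colord", "geoclue",
   "snapd", "packagekit", "fwupd"]

-- A's 'for sys_svc in SYSTEM_INSTALLED: if sys_svc.lower() in name_lower: return "system"' loop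
def pvScanA (ps : List String) (nl : List Char) : Bool :=
  match ps with
  | [] => false
  | p :: rest =>
    if PySem.Chars.isIn (PySem.Chars.lower p.toList) nl then true else pvScanA rest nl

def get_installation_source (name : String) (unit_file : Option String) : String :=
  let name_lower := PySem.Chars.lower name.toList
  if pvScanA pvSys name_lower then "system"
  else
    match unit_file with
    | some u =>
      if u ≠ "" then  -- Python truthiness of the string
        if PySem.Str.isIn "/usr/lib/" u || PySem.Str.isIn "/lib/systemd/" u then "system"
        else if PySem.Str.isIn "/etc/systemd/user/" u || PySem.Str.isIn "/.local/" u then "user"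
        else "unknown"
      else "unknown"
    | none => "unknown"

-- ===== PORT B =====
-- _PATTERNS from Source B (pre-lowercased set)
def pvPats : List String :=
  ["systemd", "dbus", "rsyslog", "syslog", "journald", "logind",
   "udev", "acpid", "cron", "anacron", "atd", "polkit",
   "networkmanager", "systemd-networkd", "wpa_supplicant",
   "gdm", "sddm", "lightdm", "xdm",
   "alsa", "pulseaudio", "pipewire",
   "cups", "bluetooth", "avahi",
   "udisks", "upower", "colord", "geoclue",
   "snapd", "packagekit", "fwupd"]

-- _LENGTHS from Source B: the distinct pattern lengths, sorted
def pvLens : List Nat := [3, 4, 5, 6, 7, 8, 9, 10, 14, 16]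

-- _PATH_RULES from Source B
def pvRules : List (String × String) :=
  [("/usr/lib/", "system"), ("/lib/systemd/", "system"),
   ("/etc/systemd/user/", "user"), ("/.local/", "user")]

-- Source B's sliding-window double loop: 'for i in range(n): for L in _LENGTHS: if i+L<=n and s[i:i+L] in _PATTERNS'
def pvWindowHit (s : List Char) : Bool :=
  (List.range s.length).any fun i =>
    pvLens.any fun L =>
      decide (i + L ≤ s.length) &&
      pvPats.any (fun p => p.toList == PySem.List.slice s (some (i : Int)) (some ((i : Int) + (L : Int))))

-- Source B's 'for sub, src in _PATH_RULES: if sub in unit_file: return src' loop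
def pvPathScan (rules : List (String × String)) (u : String) : String :=
  match rules with
  | [] => "unknown"
  | (sub, src) :: rest => if PySem.Str.isIn sub u then src else pvPathScan rest u

def get_installation_source_alt (name : String) (unit_file : Option String) : String :=
  let s := PySem.Chars.lower name.toList
  if pvWindowHit s then "system"
  else
    match unit_file with
    | some u => if u ≠ "" then pvPathScan pvRules u else "unknown"
    | none => "unknown"

-- ===== PRECONDITION & SPEC =====
def Spec_get_installation_source (name : String) (unit_file : Option String) (out : String) : Prop := out = get_installation_source_alt name unit_file
instance (name : String) (unit_file : Option String) (out : String) : Decidable (Spec_get_installation_source name unit_file out) := by unfold Spec_get_installation_source; infer_instance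

-- ===== CLAIM (what is proved, stated in full; the proofs are below) =====
def Claim_equal_get_installation_source : Prop := ∀ (name : String) (unit_file : Option String), Dom_get_installation_source name unit_file → Spec_get_installation_source name unit_file (get_installation_source name unit_file)

-- ===== LEMMAS AND PROOFS =====

theorem pvScanA_iff (nl : List Char) :
    pvScanA pvSys nl = true ↔ ∃ p ∈ pvSys, PySem.Chars.lower p.toList <:+: nl := by
  induction pvSys with
  | nil => simp [pvScanA]
  | cons p rest ih =>
    simp only [pvScanA]
    cases hp : PySem.Chars.isIn (PySem.Chars.lower p.toList) nl with
    | true =>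
      simp only [List.mem_cons]
      exact iff_of_true rfl ⟨p, Or.inl rfl, (PySem.Chars.isIn_iff_infix _ _).mp hp⟩
    | false =>
      simp only [Bool.false_eq_true, if_false, ih, List.mem_cons]
      constructor
      · rintro ⟨q, hq, hi⟩; exact ⟨q, Or.inr hq, hi⟩
      · rintro ⟨q, hq | hq, hi⟩
        · subst hq
          rw [(PySem.Chars.isIn_iff_infix _ _).mpr hi] at hp
          exact absurd hp (by simp)
        · exact ⟨q, hq, hi⟩

-- the lowered A-patterns are exactly B's pre-lowered patterns
theorem lowered_patterns :
    pvSys.map (fun p => PySem.Chars.lower p.toList) = pvPats.map String.toList := by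
  decide

-- every B-pattern is nonempty and its length appears in pvLens
theorem pats_lens : ∀ p ∈ pvPats, p.toList.length ∈ pvLens ∧ 1 ≤ p.toList.length := by
  decide

theorem pvWindowHit_iff (s : List Char) :
    pvWindowHit s = true ↔ ∃ p ∈ pvPats, p.toList <:+: s := by
  unfold pvWindowHit
  simp only [List.any_eq_true, List.mem_range, Bool.and_eq_true, decide_eq_true_eq, beq_iff_eq]
  constructor
  · rintro ⟨i, hi, L, hL, hiL, p, hp, hpe⟩
    refine ⟨p, hp, ?_⟩
    rw [hpe, PySem.List.slice_natCast_add]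
    exact ((List.take_prefix L (s.drop i)).isInfix).trans (List.drop_suffix i s).isInfix
  · rintro ⟨p, hp, t, u, hs⟩
    obtain ⟨hLmem, hL1⟩ := pats_lens p hp
    have hlen : s.length = t.length + p.toList.length + u.length := by
      rw [← hs]; simp [List.length_append]; omega
    refine ⟨t.length, by omega, p.toList.length, hLmem, by omega, p, hp, ?_⟩
    rw [PySem.List.slice_natCast_add, ← hs, List.append_assoc, List.drop_left, List.take_left]

theorem scan_eq (nl : List Char) : pvScanA pvSys nl = pvWindowHit nl := by
  rw [Bool.eq_iff_iff, pvScanA_iff, pvWindowHit_iff]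
  constructor
  · rintro ⟨p, hp, hi⟩
    have : PySem.Chars.lower p.toList ∈ pvPats.map String.toList := by
      rw [← lowered_patterns]; exact List.mem_map_of_mem hp
    obtain ⟨q, hq, hqe⟩ := List.mem_map.mp this
    exact ⟨q, hq, hqe ▸ hi⟩
  · rintro ⟨q, hq, hi⟩
    have : q.toList ∈ pvSys.map (fun p => PySem.Chars.lower p.toList) := by
      rw [lowered_patterns]; exact List.mem_map_of_mem hq
    obtain ⟨p, hp, hpe⟩ := List.mem_map.mp this
    exact ⟨p, hp, hpe ▸ hi⟩

theorem path_eq (u : String) :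
    (if PySem.Str.isIn "/usr/lib/" u || PySem.Str.isIn "/lib/systemd/" u then "system"
     else if PySem.Str.isIn "/etc/systemd/user/" u || PySem.Str.isIn "/.local/" u then "user"
     else "unknown") = pvPathScan pvRules u := by
  simp only [pvRules, pvPathScan]
  cases h1 : PySem.Str.isIn "/usr/lib/" u <;>
    cases h2 : PySem.Str.isIn "/lib/systemd/" u <;>
      cases h3 : PySem.Str.isIn "/etc/systemd/user/" u <;>
        cases h4 : PySem.Str.isIn "/.local/" u <;>
          simp only [Bool.true_or, Bool.false_or, Bool.or_false,
            Bool.false_eq_true, if_true, if_false]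

-- ===== VERDICT (by name: the statement is the Claim_ definition above) =====
theorem get_installation_source_spec : Claim_equal_get_installation_source := by
  intro name unit_file _
  unfold Spec_get_installation_source get_installation_source get_installation_source_alt
  simp only [scan_eq]
  cases unit_file with
  | none => rfl
  | some u =>
    cases hw : pvWindowHit (PySem.Chars.lower name.toList) with
    | true => rfl
    | false =>
      simp only [Bool.false_eq_true, if_false]
      by_cases hu : u = ""
      · simp [hu]
      · rw [if_pos hu, if_pos hu, path_eq]
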